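-- pv_equiv track=rewrite | github.com/Arirou/RSA | RSA/Partie_D.py | ascii_ch
-- ===== SOURCE A (Python) =====
-- def transformation2(ch):
--     bloc = []
--     for i in range(0, len(ch), 2):
--         bloc.append(ch[i:i + 2])
--     return bloc
--
-- def transformation3(ch):
--     bloc = []
--     for i in range(0, len(ch), 3):
--         bloc.append(ch[i:i + 3])
--     return bloc
--
-- def ascii_ch(liste_coder):
--     bloc_nb = []
--     ch = []
--     mot = ''
--     mot_null = []
--     for i in range(len(liste_coder)):
--         nb = str(liste_coder[i])
--         bloc_nb.append(nb)
--         while len(bloc_nb[i]) < 6: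
--             bloc_nb[i] = '0' + bloc_nb[i]
--     for i in range(len(bloc_nb)):
--         if len(bloc_nb[i]) == 4:
--             ch.append(transformation2(bloc_nb[i]))
--         else:
--             ch.append(transformation3(bloc_nb[i]))
--     for i in range(len(ch)):
--         for j in range(len(ch[i])):
--             if int(ch[i][j]) == 0:
--                 mot_null.append(ch[i][j])
--             else:
--                 mot += chr(int(ch[i][j]))
--     return mot
-- ===== SOURCE B (Python) =====
-- def ascii_ch(liste_coder):
--     out = []
--     for n in liste_coder:
--         # number of decimal digits of n (1 for 0..9)
--         d = 1
--         p = 10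
--         while p <= n:
--             d += 1
--             p *= 10
--         # size of the trailing (short) block after grouping in threes from the left
--         r = max(6, d) % 3
--         m = n
--         tail = []
--         if r:
--             tail = [m % 10 ** r]
--             m //= 10 ** r
--         # base-1000 digits of the head, least significant first
--         blocks = []
--         while m > 0:
--             blocks.append(m % 1000)
--             m //= 1000
--         blocks.reverse()
--         for v in blocks + tail:
--             if v:
--                 out.append(chr(v))
--     return ''.join(out)
-- ===== Notes on version B (the rewrite author's own statement) =====
-- stated objective: alternative
-- what changed: A converts each number to a string, zero-pads it to 6 characters, splits it into 3-character blocks via helper functions (with a dead len==4 branch) stored in intermediate lists, and re-parses each block with int(); B never touches strings: it counts the digits with a multiplying loop, splits off the short trailing block with divmod by a power of 10, decomposes the head into base-1000 digits, and emits chr of each nonzero block value.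
import Mathlib
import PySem

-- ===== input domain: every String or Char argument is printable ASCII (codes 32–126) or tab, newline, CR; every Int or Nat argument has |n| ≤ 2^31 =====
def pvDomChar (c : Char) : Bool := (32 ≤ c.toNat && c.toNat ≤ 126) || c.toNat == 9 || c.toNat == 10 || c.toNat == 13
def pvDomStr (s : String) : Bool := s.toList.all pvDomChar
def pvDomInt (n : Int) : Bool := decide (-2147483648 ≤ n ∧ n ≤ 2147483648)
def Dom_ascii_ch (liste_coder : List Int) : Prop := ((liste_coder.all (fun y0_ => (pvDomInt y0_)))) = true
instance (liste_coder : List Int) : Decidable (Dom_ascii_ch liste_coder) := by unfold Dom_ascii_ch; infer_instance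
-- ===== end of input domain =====

-- B replaces A's string machinery (pad to 6 chars, slice into 3-char blocks, re-parse each
-- block with int()) by pure integer arithmetic: a digit-count loop, divmod by a power of 10
-- for the short trailing block, and base-1000 decomposition of the head (objective: alternative).

-- ===== PORT A =====
def transformation2 (ch : List Char) : List (List Char) :=
  (PySem.List.pyRange 0 (PySem.List.len ch) 2).foldl
    (fun bloc i => bloc ++ [PySem.List.slice ch (some i) (some (i + 2))]) []

def transformation3 (ch : List Char) : List (List Char) :=
  (PySem.List.pyRange 0 (PySem.List.len ch) 3).foldl
    (fun bloc i => bloc ++ [PySem.List.slice ch (some i) (some (i + 3))]) []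

-- A's inner while loop: while len(nb) < 6: nb = '0' + nb
def padWhile (s : List Char) : List Char :=
  if s.length < 6 then padWhile ('0' :: s) else s
termination_by 6 - s.length
decreasing_by simp [List.length_cons]; omega

def ascii_ch (liste_coder : List Int) : String :=
  -- loop 1: bloc_nb
  let bloc_nb := (PySem.List.pyRange 0 (PySem.List.len liste_coder)).foldl
    (fun acc i => acc ++ [padWhile (PySem.Int.toChars (PySem.List.pyGetD liste_coder i 0))]) []
  -- loop 2: ch
  let ch := (PySem.List.pyRange 0 (PySem.List.len bloc_nb)).foldl
    (fun acc i =>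
      acc ++ [if PySem.List.len (PySem.List.pyGetD bloc_nb i []) = 4
              then transformation2 (PySem.List.pyGetD bloc_nb i [])
              else transformation3 (PySem.List.pyGetD bloc_nb i [])]) []
  -- loop 3: (mot, mot_null); int() = ofChars? (none = ValueError, excluded by Pre_);
  -- chr = Char.ofNat (exact for the in-range code points reached inside Pre_)
  let p := (PySem.List.pyRange 0 (PySem.List.len ch)).foldl
    (fun st i =>
      (PySem.List.pyRange 0 (PySem.List.len (PySem.List.pyGetD ch i []))).foldl
        (fun st j =>
          let blk := PySem.List.pyGetD (PySem.List.pyGetD ch i []) j []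
          let v := (PySem.Int.ofChars? blk).getD 0
          if v = 0 then (st.1, st.2 ++ [blk]) else (st.1 ++ [Char.ofNat v.toNat], st.2)) st)
    (([] : List Char), ([] : List (List Char)))
  String.ofList p.1

-- ===== PORT B =====
-- 'd = 1; p = 10; while p <= n: d += 1; p *= 10' — fuel-totalised (fuel n.toNat+1 shown sufficient below)
def dloop : Nat → Int → Int → Int → Int
  | 0, _, _, d => d
  | fuel+1, n, p, d => if p ≤ n then dloop fuel n (p * 10) (d + 1) else d

-- 'while m > 0: blocks.append(m % 1000); m //= 1000' — fuel-totalised (fuel m.toNat+1 shown sufficient below)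
def bloop : Nat → Int → List Int
  | 0, _ => []
  | fuel+1, m =>
      if 0 < m then PySem.Int.mod m 1000 :: bloop fuel (PySem.Int.floordiv m 1000) else []

def ascii_ch_alt (liste_coder : List Int) : String :=
  String.ofList (liste_coder.foldl (fun out n =>
    let d := dloop (n.toNat + 1) n 10 1
    let r := PySem.Int.mod (max 6 d) 3
    -- 10 ** r : r is a nonnegative mod result here, so Int exponentiation by r.toNat is exact
    let t10 := (10 : Int) ^ r.toNat
    let tail : List Int := if r ≠ 0 then [PySem.Int.mod n t10] else []
    let m1 : Int := if r ≠ 0 then PySem.Int.floordiv n t10 else n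
    let blocks := (bloop (m1.toNat + 1) m1).reverse
    (blocks ++ tail).foldl (fun out v => if v ≠ 0 then out ++ [Char.ofNat v.toNat] else out) out) [])

-- ===== PRECONDITION & SPEC =====
-- Pre_ excludes lists containing a negative element: there A raises (ValueError from int() on a
-- block containing '-', or from chr() of a negative value).
def Pre_ascii_ch (liste_coder : List Int) : Prop := ∀ n ∈ liste_coder, 0 ≤ n
instance (liste_coder : List Int) : Decidable (Pre_ascii_ch liste_coder) := by
  unfold Pre_ascii_ch; infer_instance

def pvWitness_ascii_ch : List Int := [72101, 108108]

def Spec_ascii_ch (liste_coder : List Int) (out : String) : Prop := out = ascii_ch_alt liste_coder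
instance (liste_coder : List Int) (out : String) : Decidable (Spec_ascii_ch liste_coder out) := by
  unfold Spec_ascii_ch; infer_instance

-- ===== CLAIM (what is proved, stated in full; the proofs are below) =====
def Claim_equal_ascii_ch : Prop := ∀ (liste_coder : List Int), Dom_ascii_ch liste_coder →
  Pre_ascii_ch liste_coder → Spec_ascii_ch liste_coder (ascii_ch liste_coder)

-- ===== LEMMAS AND PROOFS =====



-- ---------- A-side reduction (loops to folds) ----------

theorem padWhile_eq (s : List Char) :
    padWhile s = List.replicate (6 - s.length) '0' ++ s := by
  suffices h : ∀ (m : Nat) (s : List Char), 6 - s.length ≤ m →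
      padWhile s = List.replicate (6 - s.length) '0' ++ s by exact h 6 s (by omega)
  intro m
  induction m with
  | zero =>
    intro s h
    rw [padWhile]
    have h6 : ¬ s.length < 6 := by omega
    rw [if_neg h6]
    have h0 : 6 - s.length = 0 := by omega
    simp [h0]
  | succ m ih =>
    intro s h
    rw [padWhile]
    by_cases h6 : s.length < 6
    · rw [if_pos h6, ih ('0' :: s) (by simp; omega)]
      have hk : 6 - s.length = (6 - ('0' :: s).length) + 1 := by simp; omega
      rw [hk, List.replicate_succ']
      simp
    · rw [if_neg h6]
      have h0 : 6 - s.length = 0 := by omega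
      simp [h0]

theorem foldl_append_singleton {α β : Type} (f : α → β) :
    ∀ (xs : List α) (acc : List β), xs.foldl (fun a x => a ++ [f x]) acc = acc ++ xs.map f := by
  intro xs
  induction xs with
  | nil => intro acc; simp
  | cons x xs ih => intro acc; simp [List.foldl_cons, ih]

theorem t3_of_pad (s : List Char) :
    (if PySem.List.len (padWhile s) = 4 then transformation2 (padWhile s)
     else transformation3 (padWhile s)) = transformation3 (padWhile s) := by
  have h : ¬ (PySem.List.len (padWhile s) = 4) := by
    rw [padWhile_eq]
    simp only [PySem.List.len_eq, List.length_append, List.length_replicate]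
    omega
  exact if_neg h

theorem fst_inner (bs : List (List Char)) :
    ∀ (st : List Char × List (List Char)),
    (bs.foldl (fun st blk =>
        if (PySem.Int.ofChars? blk).getD 0 = 0 then (st.1, st.2 ++ [blk])
        else (st.1 ++ [Char.ofNat ((PySem.Int.ofChars? blk).getD 0).toNat], st.2)) st).1
    = bs.foldl (fun m blk =>
        if (PySem.Int.ofChars? blk).getD 0 = 0 then m
        else m ++ [Char.ofNat ((PySem.Int.ofChars? blk).getD 0).toNat]) st.1 := by
  induction bs with
  | nil => intro st; rfl
  | cons b bs ih =>
    intro st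
    simp only [List.foldl_cons]
    rw [ih]
    split <;> rfl

theorem fst_double (chs : List (List (List Char))) :
    ∀ (st : List Char × List (List Char)),
    (chs.foldl (fun st chi => chi.foldl (fun st blk =>
        if (PySem.Int.ofChars? blk).getD 0 = 0 then (st.1, st.2 ++ [blk])
        else (st.1 ++ [Char.ofNat ((PySem.Int.ofChars? blk).getD 0).toNat], st.2)) st) st).1
    = chs.foldl (fun m chi => chi.foldl (fun m blk =>
        if (PySem.Int.ofChars? blk).getD 0 = 0 then m
        else m ++ [Char.ofNat ((PySem.Int.ofChars? blk).getD 0).toNat]) m) st.1 := by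
  induction chs with
  | nil => intro st; rfl
  | cons c chs ih =>
    intro st
    simp only [List.foldl_cons]
    rw [ih]
    rw [fst_inner]

theorem loop3_eq (chs : List (List (List Char))) (st : List Char × List (List Char)) :
    List.foldl (fun st i =>
      List.foldl (fun st j =>
          if (PySem.Int.ofChars? (PySem.List.pyGetD (PySem.List.pyGetD chs i []) j [])).getD 0 = 0
          then (st.1, st.2 ++ [PySem.List.pyGetD (PySem.List.pyGetD chs i []) j []])
          else (st.1 ++ [Char.ofNat ((PySem.Int.ofChars? (PySem.List.pyGetD (PySem.List.pyGetD chs i []) j [])).getD 0).toNat],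
                st.2))
        st (PySem.List.pyRange 0 (PySem.List.len (PySem.List.pyGetD chs i []))))
      st (PySem.List.pyRange 0 (PySem.List.len chs))
    = List.foldl (fun st chi => List.foldl (fun st blk =>
          if (PySem.Int.ofChars? blk).getD 0 = 0 then (st.1, st.2 ++ [blk])
          else (st.1 ++ [Char.ofNat ((PySem.Int.ofChars? blk).getD 0).toNat], st.2)) st chi) st chs := by
  rw [PySem.List.foldl_pyRange_zero_pyGetD chs []
    (fun st chi => List.foldl (fun st j =>
        if (PySem.Int.ofChars? (PySem.List.pyGetD chi j [])).getD 0 = 0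
        then (st.1, st.2 ++ [PySem.List.pyGetD chi j []])
        else (st.1 ++ [Char.ofNat ((PySem.Int.ofChars? (PySem.List.pyGetD chi j [])).getD 0).toNat], st.2))
      st (PySem.List.pyRange 0 (PySem.List.len chi))) st]
  refine PySem.List.foldl_congr_mem chs _ _ st ?_
  intro acc chi _
  exact PySem.List.foldl_pyRange_zero_pyGetD chi []
    (fun st blk =>
      if (PySem.Int.ofChars? blk).getD 0 = 0 then (st.1, st.2 ++ [blk])
      else (st.1 ++ [Char.ofNat ((PySem.Int.ofChars? blk).getD 0).toNat], st.2)) acc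

-- A's per-element emitter (after the reduction: fold over the 3-char blocks of the padded string)
def emitA (acc : List Char) (n : Int) : List Char :=
  (transformation3 (padWhile (PySem.Int.toChars n))).foldl
    (fun m blk => if (PySem.Int.ofChars? blk).getD 0 = 0 then m
                  else m ++ [Char.ofNat ((PySem.Int.ofChars? blk).getD 0).toNat]) acc

-- A as a single fold of emitA over the input list
theorem ascii_ch_eq_fold (l : List Int) :
    ascii_ch l = String.ofList (l.foldl emitA []) := by
  simp only [ascii_ch]
  rw [PySem.List.foldl_pyRange_zero_pyGetD l 0
    (fun acc n => acc ++ [padWhile (PySem.Int.toChars n)]) []]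
  rw [foldl_append_singleton (fun n => padWhile (PySem.Int.toChars n)) l []]
  simp only [List.nil_append]
  rw [PySem.List.foldl_pyRange_zero_pyGetD (l.map (fun n => padWhile (PySem.Int.toChars n))) []
    (fun acc b => acc ++ [if PySem.List.len b = 4 then transformation2 b else transformation3 b]) []]
  rw [foldl_append_singleton
    (fun b => if PySem.List.len b = 4 then transformation2 b else transformation3 b)
    (l.map (fun n => padWhile (PySem.Int.toChars n))) []]
  simp only [List.nil_append, List.map_map, Function.comp_def, t3_of_pad]
  rw [loop3_eq]
  rw [fst_double]
  simp only [List.foldl_map]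
  rfl

-- B's per-element emitter (literally the body of the fold in ascii_ch_alt)
def emitB (acc : List Char) (n : Int) : List Char :=
  let d := dloop (n.toNat + 1) n 10 1
  let r := PySem.Int.mod (max 6 d) 3
  let t10 := (10 : Int) ^ r.toNat
  let tail : List Int := if r ≠ 0 then [PySem.Int.mod n t10] else []
  let m1 : Int := if r ≠ 0 then PySem.Int.floordiv n t10 else n
  let blocks := (bloop (m1.toNat + 1) m1).reverse
  (blocks ++ tail).foldl (fun out v => if v ≠ 0 then out ++ [Char.ofNat v.toNat] else out) acc

theorem ascii_ch_alt_eq_fold (l : List Int) :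
    ascii_ch_alt l = String.ofList (l.foldl emitB []) := by
  rfl


-- ---------- chunking ----------

def chunks3 (xs : List Char) : List (List Char) :=
  if h : xs = [] then [] else xs.take 3 :: chunks3 (xs.drop 3)
termination_by xs.length
decreasing_by cases xs with | nil => simp at h | cons a t => simp

theorem pyRange3_nil (a b : Int) (h : b ≤ a) : PySem.List.pyRange a b 3 = [] := by
  rw [PySem.List.pyRange_of_pos a b (by norm_num)]
  rw [if_neg (by omega)]
  simp

theorem pyRange3_cons (a b : Int) (h : a < b) :
    PySem.List.pyRange a b 3 = a :: PySem.List.pyRange (a + 3) b 3 := by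
  rw [PySem.List.pyRange_of_pos a b (by norm_num),
      PySem.List.pyRange_of_pos (a + 3) b (by norm_num)]
  rw [if_pos h]
  by_cases h2 : a + 3 < b
  · rw [if_pos h2]
    have hN : ((b - a + 3 - 1) / 3).toNat = ((b - (a + 3) + 3 - 1) / 3).toNat + 1 := by
      omega
    rw [hN, List.range_succ_eq_map]
    simp only [List.map_cons, List.map_map, Function.comp_def]
    congr 1
    · push_cast
      ring
    · apply List.map_congr_left
      intro k _
      push_cast
      ring
  · rw [if_neg h2]
    have hN : ((b - a + 3 - 1) / 3).toNat = 1 := by omega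
    rw [hN]
    simp

theorem t3_aux (fuel : Nat) : ∀ (xs : List Char) (k : Nat) (acc : List (List Char)),
    xs.length ≤ k + fuel →
    (PySem.List.pyRange (k : Int) ((xs.length : Nat) : Int) 3).foldl
      (fun b i => b ++ [PySem.List.slice xs (some i) (some (i + 3))]) acc
    = acc ++ chunks3 (xs.drop k) := by
  induction fuel with
  | zero =>
    intro xs k acc h
    rw [pyRange3_nil _ _ (by exact_mod_cast h)]
    rw [List.drop_of_length_le (by omega), chunks3]
    simp
  | succ fuel ih =>
    intro xs k acc h
    by_cases hk : k < xs.length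
    · rw [pyRange3_cons _ _ (by exact_mod_cast hk)]
      simp only [List.foldl_cons]
      have hc : ((k : Int)) + 3 = ((k + 3 : Nat) : Int) := by push_cast; ring
      rw [hc, PySem.List.slice_natCast xs k (k + 3)]
      have ht : k + 3 - k = 3 := by omega
      rw [ht]
      rw [ih xs (k + 3) _ (by omega)]
      have hne : xs.drop k ≠ [] := by
        simp [List.drop_eq_nil_iff]
        omega
      conv_rhs => rw [chunks3, dif_neg hne]
      rw [List.drop_drop]
      simp
    · rw [pyRange3_nil _ _ (by exact_mod_cast (by omega : xs.length ≤ k))]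
      rw [List.drop_of_length_le (by omega), chunks3]
      simp

theorem transformation3_eq_chunks3 (xs : List Char) : transformation3 xs = chunks3 xs := by
  unfold transformation3
  have h0 : (0 : Int) = ((0 : Nat) : Int) := by norm_num
  rw [PySem.List.len_eq, h0, t3_aux xs.length xs 0 [] (by omega)]
  simp

-- ---------- digit lists ----------

def padD (b : Nat) : Nat → Nat → List Nat
  | 0, _ => []
  | k+1, v => padD b k (v / b) ++ [v % b]

def padDigitsC (k v : Nat) : List Char := (padD 10 k v).map Nat.digitChar

theorem padD_zero_val (b k : Nat) : padD b k 0 = List.replicate k 0 := by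
  induction k with
  | zero => rfl
  | succ k ih => simp [padD, Nat.zero_div, ih, List.replicate_succ']

theorem padD_split (b j k v : Nat) :
    padD b (j + k) v = padD b j (v / b ^ k) ++ padD b k (v % b ^ k) := by
  induction k generalizing v with
  | zero => simp [padD]
  | succ k ih =>
    have h1 : v / b / b ^ k = v / b ^ (k + 1) := by
      rw [Nat.div_div_eq_div_mul, pow_succ']
    have h2 : v % b ^ (k + 1) / b = v / b % b ^ k := by
      rw [pow_succ']
      exact Nat.mod_mul_right_div_self v b (b ^ k)
    have h3 : v % b ^ (k + 1) % b = v % b :=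
      Nat.mod_mod_of_dvd v (dvd_pow_self b (Nat.succ_ne_zero k))
    show padD b (j + k + 1) v = _
    simp only [padD, ih (v / b), h1, h2, h3, List.append_assoc]

theorem padD_cons (b k v : Nat) :
    padD b (k + 1) v = (v / b ^ k % b) :: padD b k (v % b ^ k) := by
  have := padD_split b 1 k v
  rw [add_comm 1 k] at this
  simpa [padD] using this

theorem padD_length (b k v : Nat) : (padD b k v).length = k := by
  induction k generalizing v with
  | zero => rfl
  | succ k ih => simp [padD, ih]

theorem padD_lt (b k v : Nat) (hb : 0 < b) : ∀ x ∈ padD b k v, x < b := by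
  induction k generalizing v with
  | zero => simp [padD]
  | succ k ih =>
    intro x hx
    simp only [padD, List.mem_append, List.mem_singleton] at hx
    rcases hx with h | h
    · exact ih _ x h
    · subst h; exact Nat.mod_lt _ hb

theorem tdc_acc (b f : Nat) : ∀ (n : Nat) (acc : List Char),
    Nat.toDigitsCore b f n acc = Nat.toDigitsCore b f n [] ++ acc := by
  induction f with
  | zero => intro n acc; simp [Nat.toDigitsCore]
  | succ f ih =>
    intro n acc
    simp only [Nat.toDigitsCore]
    by_cases h : n / b = 0
    · simp [h]
    · simp only [h, if_false]
      rw [ih (n / b) (Nat.digitChar (n % b) :: acc), ih (n / b) [Nat.digitChar (n % b)]]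
      simp

theorem tdc_fuel (f : Nat) : ∀ (f' n : Nat) (acc : List Char), n < f → n < f' →
    Nat.toDigitsCore 10 f n acc = Nat.toDigitsCore 10 f' n acc := by
  induction f with
  | zero => intro f' n acc h; omega
  | succ f ih =>
    intro f' n acc h h'
    cases f' with
    | zero => omega
    | succ f'' =>
      simp only [Nat.toDigitsCore]
      by_cases h0 : n / 10 = 0
      · simp [h0]
      · simp only [h0, if_false]
        have hn : 10 ≤ n := by
          by_contra hc
          exact h0 (Nat.div_eq_of_lt (by omega))
        have hd : n / 10 < n := Nat.div_lt_self (by omega) (by omega)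
        rw [ih f'' (n / 10) _ (by omega) (by omega)]

theorem toDigits_base (m : Nat) (h : m < 10) : Nat.toDigits 10 m = [Nat.digitChar m] := by
  simp [Nat.toDigits, Nat.toDigitsCore, Nat.div_eq_of_lt h, Nat.mod_eq_of_lt h]

theorem toDigits_step (m : Nat) (h : 10 ≤ m) :
    Nat.toDigits 10 m = Nat.toDigits 10 (m / 10) ++ [Nat.digitChar (m % 10)] := by
  have h0 : ¬ (m / 10 = 0) := by
    intro hc; omega
  show Nat.toDigitsCore 10 (m + 1) m [] = _
  simp only [Nat.toDigitsCore, h0, if_false]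
  rw [tdc_acc, tdc_fuel m (m / 10 + 1) (m / 10) [] (by omega) (by omega)]
  rfl

def nd (m : Nat) : Nat := if m < 10 then 1 else nd (m / 10) + 1
termination_by m
decreasing_by simp at *; omega

theorem nd_pos (m : Nat) : 1 ≤ nd m := by
  rw [nd]; split <;> omega

theorem toDigits_len (m : Nat) : (Nat.toDigits 10 m).length = nd m := by
  induction m using nd.induct with
  | case1 m h => rw [toDigits_base m h, nd, if_pos h]; rfl
  | case2 m h ih =>
    rw [toDigits_step m (by omega), nd, if_neg h]
    simp [ih]

theorem nd_spec (m : Nat) : m < 10 ^ nd m ∧ (nd m = 1 ∨ 10 ^ (nd m - 1) ≤ m) := by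
  induction m using nd.induct with
  | case1 m h => rw [nd, if_pos h]; simp; omega
  | case2 m h ih =>
    rw [nd, if_neg h]
    obtain ⟨ih1, ih2⟩ := ih
    constructor
    · have : 10 ^ (nd (m / 10) + 1) = 10 * 10 ^ nd (m / 10) := by ring
      rw [this]
      omega
    · right
      have hp : nd (m / 10) + 1 - 1 = nd (m / 10) := by omega
      rw [hp]
      rcases ih2 with h1 | h1
      · rw [h1]; omega
      · have hnd := nd_pos (m / 10)
        have : 10 ^ nd (m / 10) = 10 * 10 ^ (nd (m / 10) - 1) := by
          rw [← pow_succ']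
          congr 1
          omega
        rw [this]
        omega

theorem nd_iff (m k : Nat) (hk : 1 ≤ k) : 10 ^ k ≤ m ↔ k < nd m := by
  obtain ⟨h1, h2⟩ := nd_spec m
  constructor
  · intro h
    by_contra hc
    have : nd m ≤ k := by omega
    have := Nat.pow_le_pow_right (by norm_num : 1 ≤ 10) this
    omega
  · intro h
    rcases h2 with h2 | h2
    · omega
    · have : 10 ^ k ≤ 10 ^ (nd m - 1) := Nat.pow_le_pow_right (by norm_num) (by omega)
      omega

theorem nd_le (m : Nat) : nd m ≤ m + 1 := by
  induction m using nd.induct with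
  | case1 m h => rw [nd, if_pos h]; omega
  | case2 m h ih => rw [nd, if_neg h]; omega

-- ---------- padded decimal strings ----------

theorem padDigitsC_eq (k : Nat) : ∀ (m : Nat), m < 10 ^ k → 1 ≤ k →
    padDigitsC k m = List.replicate (k - nd m) '0' ++ Nat.toDigits 10 m := by
  induction k with
  | zero => intro m _ h; omega
  | succ k ih =>
    intro m hm _
    by_cases h : m < 10
    · show ((padD 10 k (m / 10) ++ [m % 10]).map Nat.digitChar) = _
      rw [Nat.div_eq_of_lt h, Nat.mod_eq_of_lt h, padD_zero_val, toDigits_base m h]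
      rw [nd, if_pos h]
      simp [List.map_replicate]
      exact Or.inr (by decide)
    · have hk : 1 ≤ k := by
        by_contra hc
        have : k = 0 := by omega
        subst this
        simp at hm
        omega
      have hm' : m / 10 < 10 ^ k := by
        rw [Nat.div_lt_iff_lt_mul (by norm_num)]
        calc m < 10 ^ (k + 1) := hm
        _ = 10 ^ k * 10 := by ring
      show ((padD 10 k (m / 10) ++ [m % 10]).map Nat.digitChar) = _
      rw [List.map_append]
      have : (padD 10 k (m / 10)).map Nat.digitChar = padDigitsC k (m / 10) := rfl
      rw [show nd m = nd (m / 10) + 1 from by rw [nd, if_neg h]]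
      rw [this, ih (m / 10) hm' hk, toDigits_step m (by omega)]
      simp only [List.append_assoc, List.map_cons, List.map_nil]
      congr 2
      omega

theorem chunks3_cons3 (xs ys : List Char) (h : xs.length = 3) :
    chunks3 (xs ++ ys) = xs :: chunks3 ys := by
  rw [chunks3]
  have hne : xs ++ ys ≠ [] := by
    intro hc
    simp at hc
    rw [hc.1] at h
    simp at h
  rw [dif_neg hne]
  congr 1
  · rw [List.take_append, h]
    simp [List.take_of_length_le (le_of_eq h)]
  · rw [List.drop_append, h]
    simp [List.drop_of_length_le (le_of_eq h)]

theorem chunks3_padDigitsC (q : Nat) : ∀ (r m : Nat), r < 3 → m < 10 ^ (3 * q + r) →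
    chunks3 (padDigitsC (3 * q + r) m)
      = (padD 1000 q (m / 10 ^ r)).map (fun v => padDigitsC 3 v)
        ++ (if r = 0 then [] else [padDigitsC r (m % 10 ^ r)]) := by
  induction q with
  | zero =>
    intro r m hr hm
    simp only [Nat.mul_zero, Nat.zero_add] at hm ⊢
    interval_cases r
    · show chunks3 (padDigitsC 0 m) = _
      rw [show padDigitsC 0 m = [] from rfl, chunks3]
      simp [padD]
    · have hlen : (padDigitsC 1 m).length = 1 := by
        simp [padDigitsC, padD_length]
      rw [chunks3, dif_neg (by intro hc; rw [hc] at hlen; simp at hlen)]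
      rw [List.take_of_length_le (by omega), List.drop_of_length_le (by omega), chunks3]
      rw [Nat.mod_eq_of_lt (by simpa using hm)]
      simp [padD]
    · have hlen : (padDigitsC 2 m).length = 2 := by
        simp [padDigitsC, padD_length]
      rw [chunks3, dif_neg (by intro hc; rw [hc] at hlen; simp at hlen)]
      rw [List.take_of_length_le (by omega), List.drop_of_length_le (by omega), chunks3]
      rw [Nat.mod_eq_of_lt (by simpa using hm)]
      simp [padD]
  | succ q ih =>
    intro r m hr hm
    have hsplit : 3 * (q + 1) + r = 3 + (3 * q + r) := by ring
    rw [hsplit]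
    have hpd : padDigitsC (3 + (3 * q + r)) m
        = padDigitsC 3 (m / 10 ^ (3 * q + r)) ++ padDigitsC (3 * q + r) (m % 10 ^ (3 * q + r)) := by
      unfold padDigitsC
      rw [padD_split 10 3 (3 * q + r) m, List.map_append]
    rw [hpd, chunks3_cons3 _ _ (by simp [padDigitsC, padD_length])]
    rw [ih r (m % 10 ^ (3 * q + r)) hr (Nat.mod_lt _ (by positivity))]
    -- identities
    have e1 : m % 10 ^ (3 * q + r) % 10 ^ r = m % 10 ^ r :=
      Nat.mod_mod_of_dvd m (pow_dvd_pow 10 (by omega))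
    have e2 : m % 10 ^ (3 * q + r) / 10 ^ r = m / 10 ^ r % 1000 ^ q := by
      have : (10 : Nat) ^ (3 * q + r) = 10 ^ r * 1000 ^ q := by
        rw [show (1000 : Nat) = 10 ^ 3 from rfl, ← pow_mul]
        rw [← pow_add]
        ring_nf
      rw [this, Nat.mod_mul_right_div_self]
    have e3 : m / 10 ^ r / 1000 ^ q = m / 10 ^ (3 * q + r) := by
      rw [Nat.div_div_eq_div_mul]
      congr 1
      rw [show (1000 : Nat) = 10 ^ 3 from rfl, ← pow_mul, ← pow_add]
      ring_nf
    have e4 : m / 10 ^ (3 * q + r) < 1000 := by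
      rw [Nat.div_lt_iff_lt_mul (by positivity)]
      calc m < 10 ^ (3 * (q + 1) + r) := hm
      _ = 1000 * 10 ^ (3 * q + r) := by
        rw [show (1000 : Nat) = 10 ^ 3 from rfl, ← pow_add]
        ring_nf
    rw [e1, e2]
    conv_rhs => rw [padD_cons 1000 q (m / 10 ^ r)]
    rw [e3, Nat.mod_eq_of_lt e4]
    simp

-- ---------- block values: int() applied to a zero-padded digit block ----------

set_option maxRecDepth 100000 in
theorem ofChars_pad1 : ∀ v : Fin 10, PySem.Int.ofChars? (padDigitsC 1 v) = some (v : Int) := by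
  decide

set_option maxRecDepth 100000 in
theorem ofChars_pad2 : ∀ v : Fin 100, PySem.Int.ofChars? (padDigitsC 2 v) = some (v : Int) := by
  decide

set_option maxRecDepth 100000 in
theorem ofChars_pad3 : ∀ v : Fin 1000, PySem.Int.ofChars? (padDigitsC 3 v) = some (v : Int) := by
  decide

-- ---------- cast helpers, emit folds, B's loops ----------

def minD1000 (m : Nat) : List Nat :=
  if m < 1000 then [m] else minD1000 (m / 1000) ++ [m % 1000]
termination_by m
decreasing_by simp at *; omega


theorem pymod_cast (a b : Nat) : PySem.Int.mod (a : Int) (b : Int) = ((a % b : Nat) : Int) := by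
  show Int.fmod _ _ = _
  rw [Int.fmod_eq_emod]
  simp

theorem pyfdiv_cast (a b : Nat) :
    PySem.Int.floordiv (a : Int) (b : Int) = ((a / b : Nat) : Int) := by
  show Int.fdiv _ _ = _
  rw [Int.fdiv_eq_ediv]
  simp

theorem bloop_zero (fuel : Nat) : bloop fuel 0 = [] := by
  cases fuel <;> simp [bloop]

theorem bloop_eq (fuel : Nat) : ∀ (m : Nat), 1 ≤ m → m < 1000 ^ fuel →
    bloop fuel (m : Int) = ((minD1000 m).map (Nat.cast : Nat → Int)).reverse := by
  induction fuel with
  | zero => intro m h1 hf; simp at hf; omega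
  | succ fuel ih =>
    intro m h1 hf
    have hpos : (0 : Int) < (m : Int) := by exact_mod_cast h1
    simp only [bloop, if_pos hpos]
    have e1 : (1000 : Int) = ((1000 : Nat) : Int) := by norm_num
    rw [e1, pymod_cast m 1000, pyfdiv_cast m 1000]
    by_cases h : m < 1000
    · have hd : m / 1000 = 0 := Nat.div_eq_of_lt h
      rw [hd]
      simp only [Nat.cast_zero, bloop_zero]
      rw [minD1000, if_pos h]
      simp [Nat.mod_eq_of_lt h]
    · have hge : 1000 ≤ m := by omega
      have hd1 : 1 ≤ m / 1000 := by
        exact (Nat.le_div_iff_mul_le (by norm_num)).mpr (by omega)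
      have hd2 : m / 1000 < 1000 ^ fuel := by
        rw [Nat.div_lt_iff_lt_mul (by norm_num)]
        calc m < 1000 ^ (fuel + 1) := hf
        _ = 1000 ^ fuel * 1000 := by ring
      rw [minD1000, if_neg h, ih (m / 1000) hd1 hd2]
      simp

theorem padD1000_eq (q : Nat) : ∀ (m : Nat), m < 1000 ^ q → 1 ≤ q →
    padD 1000 q m = List.replicate (q - (minD1000 m).length) 0 ++ minD1000 m := by
  induction q with
  | zero => intro m _ h; omega
  | succ q ih =>
    intro m hm _
    by_cases h : m < 1000
    · show padD 1000 q (m / 1000) ++ [m % 1000] = _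
      rw [Nat.div_eq_of_lt h, Nat.mod_eq_of_lt h, padD_zero_val, minD1000, if_pos h]
      simp
    · have hq : 1 ≤ q := by
        by_contra hc
        have : q = 0 := by omega
        subst this
        simp [pow_one] at hm
        omega
      have hd2 : m / 1000 < 1000 ^ q := by
        rw [Nat.div_lt_iff_lt_mul (by norm_num)]
        calc m < 1000 ^ (q + 1) := hm
        _ = 1000 ^ q * 1000 := by ring
      show padD 1000 q (m / 1000) ++ [m % 1000] = _
      rw [minD1000, if_neg h, ih (m / 1000) hd2 hq]
      simp only [List.length_append, List.length_singleton, List.append_assoc]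
      congr 2
      omega

theorem dloop_gl (fuel : Nat) : ∀ (m k : Nat) (d : Int), 1 ≤ k → nd m ≤ k + fuel →
    dloop fuel (m : Int) ((10 ^ k : Nat) : Int) d = d + ((nd m - k : Nat) : Int) := by
  induction fuel with
  | zero =>
    intro m k d hk h
    have : nd m - k = 0 := by omega
    simp [dloop, this]
  | succ fuel ih =>
    intro m k d hk h
    simp only [dloop]
    by_cases hle : 10 ^ k ≤ m
    · rw [if_pos (by exact_mod_cast hle)]
      have hk1 : k < nd m := (nd_iff m k hk).mp hle
      have hcast : ((10 ^ k : Nat) : Int) * 10 = ((10 ^ (k + 1) : Nat) : Int) := by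
        push_cast [pow_succ]
        ring
      rw [hcast, ih m (k + 1) (d + 1) (by omega) (by omega)]
      have : (nd m - (k + 1)) + 1 = nd m - k := by omega
      omega
    · rw [if_neg (by exact_mod_cast hle)]
      have : nd m ≤ k := by
        by_contra hc
        exact hle ((nd_iff m k hk).mpr (by omega))
      have h0 : nd m - k = 0 := by omega
      simp [h0]

theorem dloop_eq (m : Nat) : dloop (m + 1) (m : Int) 10 1 = ((nd m : Nat) : Int) := by
  have h10 : (10 : Int) = ((10 ^ 1 : Nat) : Int) := by norm_num
  rw [h10, dloop_gl (m + 1) m 1 1 (by omega) (by have := nd_le m; omega)]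
  have := nd_pos m
  omega

-- ---------- per-element equality ----------

theorem toChars_natCast (m : Nat) : PySem.Int.toChars (m : Int) = Nat.toDigits 10 m := by
  simp [PySem.Int.toChars]

def natStep : List Char → Nat → List Char :=
  fun out v => if v = 0 then out else out ++ [Char.ofNat v]

theorem emitN_fold (vals : List Nat) : ∀ (acc : List Char),
    vals.foldl natStep acc = acc ++ (vals.filter (fun v => v ≠ 0)).map Char.ofNat := by
  induction vals with
  | nil => intro acc; simp
  | cons v vs ih =>
    intro acc
    rw [List.foldl_cons, ih, List.filter_cons]
    by_cases h : v = 0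
    · simp [natStep, h]
    · simp [natStep, h]

-- B's emit loop over a list of casts is the Nat-level emit loop
theorem cast_fold (xs : List Nat) : ∀ (acc : List Char),
    (xs.map (Nat.cast : Nat → Int)).foldl
      (fun out v => if v ≠ 0 then out ++ [Char.ofNat v.toNat] else out) acc
      = xs.foldl natStep acc := by
  induction xs with
  | nil => intro acc; rfl
  | cons w ws ih =>
    intro acc
    simp only [List.map_cons, List.foldl_cons]
    rw [ih]
    congr 1
    simp [natStep, ite_not]

-- A's emit step applied to a zero-padded digit block
theorem stepA_pad3 (st : List Char) (w : Nat) (hw : w < 1000) :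
    (if (PySem.Int.ofChars? (padDigitsC 3 w)).getD 0 = 0 then st
     else st ++ [Char.ofNat ((PySem.Int.ofChars? (padDigitsC 3 w)).getD 0).toNat])
    = natStep st w := by
  have h := ofChars_pad3 ⟨w, hw⟩
  rw [show ((⟨w, hw⟩ : Fin 1000) : Int) = (w : Int) from rfl] at h
  rw [h]
  simp [natStep]

theorem stepA_pad1 (st : List Char) (w : Nat) (hw : w < 10) :
    (if (PySem.Int.ofChars? (padDigitsC 1 w)).getD 0 = 0 then st
     else st ++ [Char.ofNat ((PySem.Int.ofChars? (padDigitsC 1 w)).getD 0).toNat])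
    = natStep st w := by
  have h := ofChars_pad1 ⟨w, hw⟩
  rw [show ((⟨w, hw⟩ : Fin 10) : Int) = (w : Int) from rfl] at h
  rw [h]
  simp [natStep]

theorem stepA_pad2 (st : List Char) (w : Nat) (hw : w < 100) :
    (if (PySem.Int.ofChars? (padDigitsC 2 w)).getD 0 = 0 then st
     else st ++ [Char.ofNat ((PySem.Int.ofChars? (padDigitsC 2 w)).getD 0).toNat])
    = natStep st w := by
  have h := ofChars_pad2 ⟨w, hw⟩
  rw [show ((⟨w, hw⟩ : Fin 100) : Int) = (w : Int) from rfl] at h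
  rw [h]
  simp [natStep]

theorem pow1000 (h : Nat) : h < 1000 ^ (h + 1) :=
  lt_of_lt_of_le (Nat.lt_pow_self (by norm_num))
    (Nat.pow_le_pow_right (by norm_num) (by omega))

theorem elem_eq (acc : List Char) (n : Int) (hn : 0 ≤ n) : emitA acc n = emitB acc n := by
  lift n to Nat using hn with m
  have hr3 : max 6 (nd m) % 3 < 3 := Nat.mod_lt _ (by norm_num)
  have hL6 : 6 ≤ max 6 (nd m) := le_max_left _ _
  have hLsum : 3 * (max 6 (nd m) / 3) + max 6 (nd m) % 3 = max 6 (nd m) := by omega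
  have hmL : m < 10 ^ (max 6 (nd m)) := by
    have h1 := (nd_spec m).1
    have h2 : (10:Nat) ^ nd m ≤ 10 ^ max 6 (nd m) :=
      Nat.pow_le_pow_right (by norm_num) (le_max_right _ _)
    omega
  have hq2 : 2 ≤ max 6 (nd m) / 3 := by omega
  have hhlt : m / 10 ^ (max 6 (nd m) % 3) < 1000 ^ (max 6 (nd m) / 3) := by
    rw [Nat.div_lt_iff_lt_mul (by positivity)]
    calc m < 10 ^ (max 6 (nd m)) := hmL
    _ = 1000 ^ (max 6 (nd m) / 3) * 10 ^ (max 6 (nd m) % 3) := by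
      rw [show (1000 : Nat) = 10 ^ 3 from rfl, ← pow_mul, ← pow_add]
      congr 1
      omega
  -- ===== A side: reduce to a natStep fold over block values =====
  have hA : emitA acc (m : Int)
      = (padD 1000 (max 6 (nd m) / 3) (m / 10 ^ (max 6 (nd m) % 3))
          ++ (if max 6 (nd m) % 3 = 0 then [] else [m % 10 ^ (max 6 (nd m) % 3)])).foldl
          natStep acc := by
    unfold emitA
    rw [toChars_natCast, padWhile_eq, toDigits_len]
    have hpad : List.replicate (6 - nd m) '0' ++ Nat.toDigits 10 m
        = padDigitsC (max 6 (nd m)) m := by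
      rw [padDigitsC_eq (max 6 (nd m)) m hmL (by omega)]
      congr 2
      omega
    rw [hpad, transformation3_eq_chunks3]
    rw [← hLsum, chunks3_padDigitsC _ _ _ hr3 (by rw [hLsum]; exact hmL)]
    rw [hLsum]
    rw [List.foldl_append, List.foldl_map]
    rw [PySem.List.foldl_congr_mem _ _ natStep acc
      (fun st w hw => stepA_pad3 st w
        (padD_lt 1000 _ _ (by norm_num) w hw))]
    rw [List.foldl_append]
    rcases (by omega : max 6 (nd m) % 3 = 0 ∨ max 6 (nd m) % 3 = 1 ∨ max 6 (nd m) % 3 = 2)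
      with h | h | h <;> rw [h]
    · rfl
    · simp only [List.foldl_cons, List.foldl_nil, if_neg (by omega : ¬ (1:Nat) = 0)]
      exact stepA_pad1 _ _ (by
        have := Nat.mod_lt m (y := 10) (by norm_num)
        simpa [pow_one] using this)
    · simp only [List.foldl_cons, List.foldl_nil, if_neg (by omega : ¬ (2:Nat) = 0)]
      exact stepA_pad2 _ _ (Nat.mod_lt _ (by norm_num))
  -- ===== B side: reduce to the same natStep fold over B's block values =====
  have hB : emitB acc (m : Int)
      = ((if m / 10 ^ (max 6 (nd m) % 3) = 0 then ([] : List Nat)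
            else minD1000 (m / 10 ^ (max 6 (nd m) % 3)))
          ++ (if max 6 (nd m) % 3 = 0 then [] else [m % 10 ^ (max 6 (nd m) % 3)])).foldl
          natStep acc := by
    simp only [emitB, Int.toNat_natCast]
    rw [dloop_eq m]
    rw [show max 6 ((nd m : Nat) : Int) = ((max 6 (nd m) : Nat) : Int) from by push_cast; rfl]
    rw [show (3 : Int) = ((3 : Nat) : Int) from by norm_num, pymod_cast]
    rw [Int.toNat_natCast]
    rw [show ((10 : Int) ^ (max 6 (nd m) % 3)) = ((10 ^ (max 6 (nd m) % 3) : Nat) : Int) from by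
      push_cast; ring]
    by_cases hr0 : max 6 (nd m) % 3 = 0
    · rw [if_neg (show ¬ (((max 6 (nd m) % 3 : Nat) : Int) ≠ 0) from by
          simp [hr0]),
        if_neg (show ¬ (((max 6 (nd m) % 3 : Nat) : Int) ≠ 0) from by
          simp [hr0]),
        if_pos hr0, Int.toNat_natCast]
      rw [hr0, pow_zero, Nat.div_one]
      by_cases hm0 : m = 0
      · rw [hm0]
        rw [show ((0 : Nat) : Int) = (0 : Int) from rfl, bloop_zero, if_pos rfl]
        rfl
      · rw [bloop_eq (m + 1) m (by omega) (pow1000 m), List.reverse_reverse, if_neg hm0]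
        rw [List.append_nil, List.append_nil]
        exact cast_fold (minD1000 m) acc
    · rw [if_pos (show (((max 6 (nd m) % 3 : Nat) : Int) ≠ 0) from by
          exact_mod_cast hr0),
        if_pos (show (((max 6 (nd m) % 3 : Nat) : Int) ≠ 0) from by
          exact_mod_cast hr0),
        if_neg hr0]
      rw [pymod_cast, pyfdiv_cast, Int.toNat_natCast]
      by_cases hh : m / 10 ^ (max 6 (nd m) % 3) = 0
      · rw [hh, if_pos rfl]
        rw [show ((0 : Nat) : Int) = (0 : Int) from rfl, bloop_zero]
        rw [List.reverse_nil, List.nil_append, List.nil_append]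
        exact cast_fold [m % 10 ^ (max 6 (nd m) % 3)] acc
      · rw [bloop_eq _ _ (Nat.one_le_iff_ne_zero.mpr hh) (pow1000 _), List.reverse_reverse, if_neg hh]
        rw [show ((minD1000 (m / 10 ^ (max 6 (nd m) % 3))).map (Nat.cast : Nat → Int))
              ++ [((m % 10 ^ (max 6 (nd m) % 3) : Nat) : Int)]
            = ((minD1000 (m / 10 ^ (max 6 (nd m) % 3)) ++ [m % 10 ^ (max 6 (nd m) % 3)]).map
                (Nat.cast : Nat → Int)) from by simp]
        exact cast_fold _ acc
  rw [hA, hB]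
  rw [emitN_fold, emitN_fold]
  congr 1
  rw [List.filter_append, List.filter_append]
  congr 2
  by_cases hh : m / 10 ^ (max 6 (nd m) % 3) = 0
  · rw [hh, padD_zero_val, if_pos rfl]
    simp
  · rw [if_neg hh]
    rw [padD1000_eq _ _ hhlt (by omega)]
    rw [List.filter_append]
    simp

-- ===== VERDICT (by name: the statement is the Claim_ definition above) =====
theorem ascii_ch_spec : Claim_equal_ascii_ch := by
  intro l _dom pre
  unfold Spec_ascii_ch
  rw [ascii_ch_eq_fold, ascii_ch_alt_eq_fold]
  congr 1
  exact PySem.List.foldl_congr_mem l _ _ [] (fun acc n hm => elem_eq acc n (pre n hm))
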